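-- pv_equiv track=rewrite | github.com/petosbratok/projects | Tic-tac-toe with AI/TicTacToe.py | twoMoveWin
-- ===== SOURCE A (Python) =====
-- combs = ((0, 1, 2), (3, 4, 5), (6, 7, 8),
--          (0, 3, 6), (1, 4, 7), (2, 5, 8),
--          (0, 4, 8), (2, 4, 6))
--
-- def twoMoveWin(table, id, turn):
--     count = 0
--     exceptionTable = table[::]
--     exceptionTable[id] = turn
--     for comb in combs:
--         if exceptionTable[comb[0]] == exceptionTable[comb[1]] != ' ' and exceptionTable[comb[2]] == ' ':
--             count += 1
--         elif exceptionTable[comb[0]] == exceptionTable[comb[2]] != ' ' and exceptionTable[comb[1]] == ' ':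
--             count += 1
--         elif exceptionTable[comb[1]] == exceptionTable[comb[2]] != ' ' and exceptionTable[comb[0]] == ' ':
--             count += 1
--     return True if count >= 2 else False
-- ===== SOURCE B (Python) =====
-- # Cell-centric re-implementation: instead of scanning the 8 lines and case-splitting on
-- # which position of the line is blank, scan the 9 cells; for each blank cell, a
-- # precomputed dict gives the partner pairs of the lines through it, and a near-win is a
-- # partner pair of equal non-blank marks. Each near-win line has exactly one blank cell,
-- # so it is counted exactly once.
-- _PARTNERS = {
--     0: ((1, 2), (3, 6), (4, 8)),
--     1: ((0, 2), (4, 7)),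
--     2: ((0, 1), (5, 8), (4, 6)),
--     3: ((4, 5), (0, 6)),
--     4: ((3, 5), (1, 7), (0, 8), (2, 6)),
--     5: ((3, 4), (2, 8)),
--     6: ((7, 8), (0, 3), (2, 4)),
--     7: ((6, 8), (1, 4)),
--     8: ((6, 7), (2, 5), (0, 4)),
-- }
--
-- def twoMoveWin(table, id, turn):
--     board = table[:]
--     board[id] = turn
--     threats = 0
--     for i, pairs in _PARTNERS.items():
--         if board[i] == ' ':
--             for j, k in pairs:
--                 if board[j] != ' ' and board[j] == board[k]:
--                     threats += 1
--     return threats >= 2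
-- ===== Notes on version B (the rewrite author's own statement) =====
-- stated objective: alternative
-- what changed: Replaced the line-by-line scan with three positional elif-cases by a cell-centric scan: iterate over the 9 cells via a precomputed cell-to-partner-pairs dict, and for each blank cell count partner pairs of equal non-blank marks; since each near-win line has exactly one blank, the totals coincide.
import Mathlib
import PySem

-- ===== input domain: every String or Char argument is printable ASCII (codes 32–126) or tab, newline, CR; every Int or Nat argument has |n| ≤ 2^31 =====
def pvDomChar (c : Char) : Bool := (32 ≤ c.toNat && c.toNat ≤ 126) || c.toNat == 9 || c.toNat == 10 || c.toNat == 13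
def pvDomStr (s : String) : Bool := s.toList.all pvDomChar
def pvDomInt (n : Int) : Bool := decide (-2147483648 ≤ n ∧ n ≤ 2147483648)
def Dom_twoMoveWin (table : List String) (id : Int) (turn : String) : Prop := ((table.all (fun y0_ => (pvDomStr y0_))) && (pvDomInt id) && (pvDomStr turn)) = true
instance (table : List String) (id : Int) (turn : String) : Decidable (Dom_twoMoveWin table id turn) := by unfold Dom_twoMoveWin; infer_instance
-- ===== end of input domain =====

-- B replaces A's loop over the 8 winning lines (with three positional elif-cases per
-- line) by a loop over the 9 cells: for each blank cell, a precomputed cell→partner-pairs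
-- table gives the lines through it, and a near-win is a partner pair of equal non-blank
-- marks (objective: alternative). Return-value equivalence only (both Pythons mutate a
-- private copy, never the argument).

-- ===== PORT A =====
def pvCombs : List (Int × Int × Int) :=
  [(0, 1, 2), (3, 4, 5), (6, 7, 8),
   (0, 3, 6), (1, 4, 7), (2, 5, 8),
   (0, 4, 8), (2, 4, 6)]

def twoMoveWin (table : List String) (id : Int) (turn : String) : Bool :=
  let exceptionTable := PySem.List.pySetD table id turn
  let count : Int := pvCombs.foldl (fun count comb =>
    let a := PySem.List.pyGetD exceptionTable comb.1 " "
    let b := PySem.List.pyGetD exceptionTable comb.2.1 " "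
    let c := PySem.List.pyGetD exceptionTable comb.2.2 " "
    if a = b ∧ b ≠ " " ∧ c = " " then count + 1
    else if a = c ∧ c ≠ " " ∧ b = " " then count + 1
    else if b = c ∧ c ≠ " " ∧ a = " " then count + 1
    else count) 0
  decide (count ≥ 2)

-- ===== PORT B =====
def pvPartners : List (Int × List (Int × Int)) :=
  [(0, [(1, 2), (3, 6), (4, 8)]),
   (1, [(0, 2), (4, 7)]),
   (2, [(0, 1), (5, 8), (4, 6)]),
   (3, [(4, 5), (0, 6)]),
   (4, [(3, 5), (1, 7), (0, 8), (2, 6)]),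
   (5, [(3, 4), (2, 8)]),
   (6, [(7, 8), (0, 3), (2, 4)]),
   (7, [(6, 8), (1, 4)]),
   (8, [(6, 7), (2, 5), (0, 4)])]

def twoMoveWin_alt (table : List String) (id : Int) (turn : String) : Bool :=
  let board := PySem.List.pySetD table id turn
  let threats : Int := pvPartners.foldl (fun threats p =>
    if PySem.List.pyGetD board p.1 " " = " " then
      p.2.foldl (fun threats jk =>
        if PySem.List.pyGetD board jk.1 " " ≠ " " ∧
           PySem.List.pyGetD board jk.1 " " = PySem.List.pyGetD board jk.2 " "
        then threats + 1 else threats) threats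
    else threats) 0
  decide (threats ≥ 2)

-- ===== PRECONDITION & SPEC =====
-- Pre_ excludes exactly the inputs where A raises IndexError: tables with fewer than
-- 9 cells (the combos index 0..8) and out-of-range move indices id.
def Pre_twoMoveWin (table : List String) (id : Int) (turn : String) : Prop :=
  9 ≤ table.length ∧ PySem.Raise.InRange table.length id
instance (table : List String) (id : Int) (turn : String) : Decidable (Pre_twoMoveWin table id turn) := by
  unfold Pre_twoMoveWin; infer_instance

def pvWitness_twoMoveWin : List String × Int × String :=
  (["X", "X", " ", "O", " ", " ", "O", " ", " "], 4, "X")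

def Spec_twoMoveWin (table : List String) (id : Int) (turn : String) (out : Bool) : Prop := out = twoMoveWin_alt table id turn
instance (table : List String) (id : Int) (turn : String) (out : Bool) : Decidable (Spec_twoMoveWin table id turn out) := by unfold Spec_twoMoveWin; infer_instance

-- ===== CLAIM (what is proved, stated in full; the proofs are below) =====
def Claim_equal_twoMoveWin : Prop := ∀ (table : List String) (id : Int) (turn : String), Dom_twoMoveWin table id turn → Pre_twoMoveWin table id turn → Spec_twoMoveWin table id turn (twoMoveWin table id turn)

-- ===== LEMMAS AND PROOFS =====

theorem pvLine_eq (a b c : String) (n : Int) :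
    (if a = b ∧ b ≠ " " ∧ c = " " then n + 1
     else if a = c ∧ c ≠ " " ∧ b = " " then n + 1
     else if b = c ∧ c ≠ " " ∧ a = " " then n + 1
     else n)
    = n + ((if a = " " ∧ (b ≠ " " ∧ b = c) then (1 : Int) else 0)
         + (if b = " " ∧ (a ≠ " " ∧ a = c) then (1 : Int) else 0)
         + (if c = " " ∧ (a ≠ " " ∧ a = b) then (1 : Int) else 0)) := by
  by_cases ha : a = " " <;> by_cases hb : b = " " <;> by_cases hc : c = " " <;>
    split_ifs <;> simp_all

theorem pvStep_flat (p : Prop) [Decidable p] (n : Int) :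
    (if p then n + 1 else n) = n + (if p then (1 : Int) else 0) := by
  split <;> ring

theorem pvGuard_add (p : Prop) [Decidable p] (n s : Int) :
    (if p then n + s else n) = n + (if p then s else 0) := by
  split <;> ring

theorem pvIf_distrib (p : Prop) [Decidable p] (x y : Int) :
    (if p then x + y else 0) = (if p then x else 0) + (if p then y else 0) := by
  split <;> ring

theorem pvIf_if (p q : Prop) [Decidable p] [Decidable q] :
    (if p then (if q then (1 : Int) else 0) else 0) = (if p ∧ q then (1 : Int) else 0) := by
  by_cases p <;> by_cases q <;> simp_all

set_option maxHeartbeats 1000000 in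
theorem pvCounts_eq (board : List String) :
    (pvCombs.foldl (fun count comb =>
      let a := PySem.List.pyGetD board comb.1 " "
      let b := PySem.List.pyGetD board comb.2.1 " "
      let c := PySem.List.pyGetD board comb.2.2 " "
      if a = b ∧ b ≠ " " ∧ c = " " then count + 1
      else if a = c ∧ c ≠ " " ∧ b = " " then count + 1
      else if b = c ∧ c ≠ " " ∧ a = " " then count + 1
      else count) (0 : Int))
    = (pvPartners.foldl (fun threats p =>
      if PySem.List.pyGetD board p.1 " " = " " then
        p.2.foldl (fun threats jk =>
          if PySem.List.pyGetD board jk.1 " " ≠ " " ∧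
             PySem.List.pyGetD board jk.1 " " = PySem.List.pyGetD board jk.2 " "
          then threats + 1 else threats) threats
      else threats) (0 : Int)) := by
  have hA : (fun (count : Int) (comb : Int × Int × Int) =>
      let a := PySem.List.pyGetD board comb.1 " "
      let b := PySem.List.pyGetD board comb.2.1 " "
      let c := PySem.List.pyGetD board comb.2.2 " "
      if a = b ∧ b ≠ " " ∧ c = " " then count + 1
      else if a = c ∧ c ≠ " " ∧ b = " " then count + 1
      else if b = c ∧ c ≠ " " ∧ a = " " then count + 1
      else count)
    = (fun (count : Int) (comb : Int × Int × Int) => count +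
        ((if PySem.List.pyGetD board comb.1 " " = " " ∧
             (PySem.List.pyGetD board comb.2.1 " " ≠ " " ∧
              PySem.List.pyGetD board comb.2.1 " " = PySem.List.pyGetD board comb.2.2 " ") then (1 : Int) else 0)
       + (if PySem.List.pyGetD board comb.2.1 " " = " " ∧
             (PySem.List.pyGetD board comb.1 " " ≠ " " ∧
              PySem.List.pyGetD board comb.1 " " = PySem.List.pyGetD board comb.2.2 " ") then (1 : Int) else 0)
       + (if PySem.List.pyGetD board comb.2.2 " " = " " ∧
             (PySem.List.pyGetD board comb.1 " " ≠ " " ∧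
              PySem.List.pyGetD board comb.1 " " = PySem.List.pyGetD board comb.2.1 " ") then (1 : Int) else 0))) := by
    funext n comb
    exact pvLine_eq _ _ _ n
  have hInner : ∀ (ps : List (Int × Int)) (t : Int),
      (ps.foldl (fun threats jk =>
        if PySem.List.pyGetD board jk.1 " " ≠ " " ∧
           PySem.List.pyGetD board jk.1 " " = PySem.List.pyGetD board jk.2 " "
        then threats + 1 else threats) t)
      = t + (ps.map (fun jk => if PySem.List.pyGetD board jk.1 " " ≠ " " ∧
           PySem.List.pyGetD board jk.1 " " = PySem.List.pyGetD board jk.2 " " then (1 : Int) else 0)).sum := by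
    intro ps t
    rw [show (fun (threats : Int) (jk : Int × Int) =>
        if PySem.List.pyGetD board jk.1 " " ≠ " " ∧
           PySem.List.pyGetD board jk.1 " " = PySem.List.pyGetD board jk.2 " "
        then threats + 1 else threats)
      = (fun (threats : Int) (jk : Int × Int) => threats +
          (if PySem.List.pyGetD board jk.1 " " ≠ " " ∧
              PySem.List.pyGetD board jk.1 " " = PySem.List.pyGetD board jk.2 " " then (1 : Int) else 0))
      from funext fun t => funext fun jk => pvStep_flat _ t]
    exact PySem.List.foldl_add _ _ _
  have hB : (fun (threats : Int) (p : Int × List (Int × Int)) =>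
      if PySem.List.pyGetD board p.1 " " = " " then
        p.2.foldl (fun threats jk =>
          if PySem.List.pyGetD board jk.1 " " ≠ " " ∧
             PySem.List.pyGetD board jk.1 " " = PySem.List.pyGetD board jk.2 " "
          then threats + 1 else threats) threats
      else threats)
    = (fun (threats : Int) (p : Int × List (Int × Int)) => threats +
        (if PySem.List.pyGetD board p.1 " " = " " then
          (p.2.map (fun jk => if PySem.List.pyGetD board jk.1 " " ≠ " " ∧
             PySem.List.pyGetD board jk.1 " " = PySem.List.pyGetD board jk.2 " " then (1 : Int) else 0)).sum
         else 0)) := by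
    funext t p
    rw [hInner]
    exact pvGuard_add _ t _
  rw [hA, hB, PySem.List.foldl_add, PySem.List.foldl_add]
  simp only [pvCombs, pvPartners, List.map_cons, List.map_nil, List.sum_cons, List.sum_nil, pvIf_distrib, pvIf_if, add_zero, zero_add]
  ring

-- ===== VERDICT (by name: the statement is the Claim_ definition above) =====
theorem twoMoveWin_spec : Claim_equal_twoMoveWin := by
  intro table id turn _ _
  unfold Spec_twoMoveWin twoMoveWin twoMoveWin_alt
  simp only [pvCounts_eq (PySem.List.pySetD table id turn)]
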